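-- pv_equiv track=rewrite | github.com/joshuabytronic/Robotic-Arm-Project | data_processing/process_data_v2.py | get_img_grid
-- ===== SOURCE A (Python) =====
-- def get_img_grid(grid_size, images):
--     img_grid = []
--     index = 0
--     for c in range(grid_size[1]):
--         for r in range(grid_size[0]):
--             if index < len(images):
--                 img_grid.append((images[index], r, c))
--                 index += 1
--     return img_grid
-- ===== SOURCE B (Python) =====
-- def get_img_grid(grid_size, images):
--     rows, cols = grid_size[0], grid_size[1]
--     area = max(rows, 0) * max(cols, 0)
--     return [(img, i % rows, i // rows) for i, img in enumerate(images[:area])]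
-- ===== Notes on version B (the rewrite author's own statement) =====
-- stated objective: faster
-- what changed: Replaces A's nested column/row loops (which iterate over every grid cell and check a manual index counter) by a single pass over images capped at rows*cols, computing each coordinate directly as (i % rows, i // rows).
import Mathlib
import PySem

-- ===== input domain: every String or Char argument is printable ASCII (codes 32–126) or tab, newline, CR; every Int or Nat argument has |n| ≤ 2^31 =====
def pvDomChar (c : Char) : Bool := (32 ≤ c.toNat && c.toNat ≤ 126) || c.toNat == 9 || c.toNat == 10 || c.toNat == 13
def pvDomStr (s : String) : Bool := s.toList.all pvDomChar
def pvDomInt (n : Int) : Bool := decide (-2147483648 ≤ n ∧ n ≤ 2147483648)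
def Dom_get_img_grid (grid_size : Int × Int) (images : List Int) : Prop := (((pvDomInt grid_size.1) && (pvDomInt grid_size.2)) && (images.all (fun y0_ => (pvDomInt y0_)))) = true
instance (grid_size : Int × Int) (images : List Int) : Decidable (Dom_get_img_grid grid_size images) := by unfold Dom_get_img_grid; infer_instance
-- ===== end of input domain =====

-- B replaces A's nested column/row loops with a single enumerate pass over images
-- capped at rows*cols, computing coordinates by i % rows and i // rows (measured faster: A iterates all rows*cols cells, B only min(len(images), rows*cols)).



-- ===== PORT A =====
-- images[index] is guarded by index < len(images), so pyGetD is exact there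
def get_img_grid (grid_size : Int × Int) (images : List Int) : List (Int × Int × Int) :=
  ((PySem.List.pyRange 0 grid_size.2 1).foldl (fun st c =>
      (PySem.List.pyRange 0 grid_size.1 1).foldl (fun st r =>
        if st.2 < (images.length : Int) then
          (st.1 ++ [(PySem.List.pyGetD images st.2 0, r, c)], st.2 + 1)
        else st) st)
    (([] : List (Int × Int × Int)), (0 : Int))).1

-- ===== PORT B =====
def get_img_grid_alt (grid_size : Int × Int) (images : List Int) : List (Int × Int × Int) :=
  let rows := grid_size.1
  let cols := grid_size.2
  let area := max rows 0 * max cols 0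
  (PySem.List.enumerate (PySem.List.slice images none (some area)) 0).map
    (fun p => (p.2, PySem.Int.mod p.1 rows, PySem.Int.floordiv p.1 rows))

-- ===== PRECONDITION & SPEC =====
def Spec_get_img_grid (grid_size : Int × Int) (images : List Int) (out : List (Int × Int × Int)) : Prop := out = get_img_grid_alt grid_size images
instance (grid_size : Int × Int) (images : List Int) (out : List (Int × Int × Int)) : Decidable (Spec_get_img_grid grid_size images out) := by unfold Spec_get_img_grid; infer_instance

-- ===== CLAIM (what is proved, stated in full; the proofs are below) =====
def Claim_equal_get_img_grid : Prop := ∀ (grid_size : Int × Int) (images : List Int), Dom_get_img_grid grid_size images → Spec_get_img_grid grid_size images (get_img_grid grid_size images)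

-- ===== LEMMAS AND PROOFS =====

-- inner row loop of A: starting at consumed index i, it appends min m (len - i) items
theorem pvA_inner (L : List Int) (c : Int) (m : Nat) (acc : List (Int × Int × Int)) (i : Nat) :
    (List.range m).foldl (fun st (k : Nat) =>
        if st.2 < (L.length : Int) then
          (st.1 ++ [(PySem.List.pyGetD L st.2 0, ((k : Nat) : Int), c)], st.2 + 1)
        else st) (acc, ((i : Nat) : Int))
    = (acc ++ (List.range (min m (L.length - i))).map
         (fun j => (PySem.List.pyGetD L (((i + j : Nat) : Nat) : Int) 0, ((j : Nat) : Int), c)),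
       (((i + min m (L.length - i) : Nat) : Nat) : Int)) := by
  induction m with
  | zero => simp
  | succ m ih =>
    rw [List.range_succ, List.foldl_append, ih]
    by_cases h : m < L.length - i
    · have h1 : min m (L.length - i) = m := by omega
      have h2 : min (m + 1) (L.length - i) = m + 1 := by omega
      simp only [List.foldl_cons, List.foldl_nil, h1, h2]
      have hg : (((i + m : Nat) : Nat) : Int) < (L.length : Int) := by
        push_cast; omega
      rw [if_pos hg]
      rw [List.range_succ, List.map_append]
      congr 1
      · simp [List.append_assoc]
    · have h1 : min m (L.length - i) = L.length - i := by omega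
      have h2 : min (m + 1) (L.length - i) = L.length - i := by omega
      simp only [List.foldl_cons, List.foldl_nil, h1, h2]
      have hg : ¬ ((((i + (L.length - i) : Nat) : Nat) : Int) < (L.length : Int)) := by
        push_cast; omega
      rw [if_neg hg]

-- outer column loop of A, for positive row count R
theorem pvA_outer (L : List Int) (R : Nat) (hR : 0 < R) (C : Nat) :
    (List.range C).foldl (fun st (c : Nat) =>
        (List.range R).foldl (fun st (k : Nat) =>
          if st.2 < (L.length : Int) then
            (st.1 ++ [(PySem.List.pyGetD L st.2 0, ((k : Nat) : Int), ((c : Nat) : Int))], st.2 + 1)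
          else st) st)
      (([] : List (Int × Int × Int)), (0 : Int))
    = ((List.range (min (C * R) L.length)).map
         (fun j => (PySem.List.pyGetD L ((j : Nat) : Int) 0, ((j % R : Nat) : Int), ((j / R : Nat) : Int))),
       ((min (C * R) L.length : Nat) : Int)) := by
  induction C with
  | zero => simp
  | succ C ih =>
    rw [List.range_succ, List.foldl_append, ih, List.foldl_cons, List.foldl_nil]
    have hcast : ((min (C * R) L.length : Nat) : Int) = (((min (C * R) L.length : Nat) : Nat) : Int) := rfl
    rw [hcast, pvA_inner]
    set a := min (C * R) L.length with ha
    set b := min R (L.length - a) with hb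
    have habR : a + b = min ((C + 1) * R) L.length := by
      have : (C + 1) * R = C * R + R := by ring
      omega
    rw [← habR, List.range_add, List.map_append, List.map_map]
    congr 1
    congr 1
    apply List.map_congr_left
    intro j hj
    have hjb : j < b := List.mem_range.mp hj
    simp only [Function.comp_apply]
    by_cases hn : L.length ≤ C * R
    · omega
    · have haC : a = C * R := by omega
      have hjR : j < R := by omega
      have hmod : (a + j) % R = j := by
        rw [haC, Nat.mul_comm C R, Nat.mul_add_mod]
        exact Nat.mod_eq_of_lt hjR
      have hdiv : (a + j) / R = C := by
        rw [haC, Nat.mul_comm C R, Nat.mul_add_div hR, Nat.div_eq_of_lt hjR]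
        omega
      rw [hmod, hdiv]

-- both ports reduce to the same explicit map when rows, cols > 0
theorem pvMain (rows cols : Int) (hr : 0 < rows) (hc : 0 < cols) (L : List Int) :
    get_img_grid (rows, cols) L = get_img_grid_alt (rows, cols) L := by
  obtain ⟨R, hR⟩ : ∃ R : Nat, rows = (R : Int) := ⟨rows.toNat, by omega⟩
  obtain ⟨C, hC⟩ : ∃ C : Nat, cols = (C : Int) := ⟨cols.toNat, by omega⟩
  have hRpos : 0 < R := by omega
  have hCpos : 0 < C := by omega
  subst hR hC
  -- A side
  unfold get_img_grid
  rw [PySem.List.pyRange_one 0 (C : Int), PySem.List.pyRange_one 0 (R : Int)]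
  simp only [zero_add, Int.sub_zero, Int.toNat_natCast, List.foldl_map]
  rw [pvA_outer L R hRpos C]
  -- B side
  unfold get_img_grid_alt
  have hmax1 : max (R : Int) 0 = (R : Int) := by omega
  have hmax2 : max (C : Int) 0 = (C : Int) := by omega
  simp only [hmax1, hmax2]
  have harea : ((R : Int) * (C : Int)) = ((R * C : Nat) : Int) := by push_cast; ring
  rw [harea, PySem.List.slice_to L (by positivity), Int.toNat_natCast]
  apply List.ext_getElem
  · simp [PySem.List.length_enumerate, Nat.mul_comm]
  · intro k h1 h2
    have hlen : (PySem.List.enumerate (List.take (R * C) L) 0).length = min (R * C) L.length := by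
      simp [PySem.List.length_enumerate]
    have hk : k < min (R * C) L.length := by
      simpa [hlen] using h2
    have hkL : k < L.length := by omega
    simp only [List.getElem_map, PySem.List.getElem_enumerate, List.getElem_range,
      List.getElem_take]
    rw [PySem.List.pyGetD_eq_getElem L 0 (by positivity) (by omega)]
    simp only [zero_add, Int.toNat_natCast]
    rw [PySem.Int.mod_natCast k R, PySem.Int.floordiv_natCast k R]

-- degenerate grids: both ports return []
theorem pvDeg (rows cols : Int) (h : rows ≤ 0 ∨ cols ≤ 0) (L : List Int) :
    get_img_grid (rows, cols) L = get_img_grid_alt (rows, cols) L := by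
  have hB : get_img_grid_alt (rows, cols) L = [] := by
    unfold get_img_grid_alt
    have : max rows 0 * max cols 0 = 0 := by
      rcases h with h | h
      · have : max rows 0 = 0 := by omega
        simp [this]
      · have : max cols 0 = 0 := by omega
        simp [this]
    simp [this, PySem.List.slice_to L le_rfl]
  rw [hB]
  unfold get_img_grid
  rcases h with h | h
  · have hin : PySem.List.pyRange 0 rows 1 = [] := PySem.List.pyRange_one_eq_nil h
    simp [hin]
  · have hout : PySem.List.pyRange 0 cols 1 = [] := PySem.List.pyRange_one_eq_nil h
    simp [hout]

-- ===== VERDICT (by name: the statement is the Claim_ definition above) =====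
theorem get_img_grid_spec : Claim_equal_get_img_grid := by
  intro gs L _
  unfold Spec_get_img_grid
  obtain ⟨rows, cols⟩ := gs
  by_cases hr : 0 < rows
  · by_cases hc : 0 < cols
    · exact pvMain rows cols hr hc L
    · exact pvDeg rows cols (Or.inr (by omega)) L
  · exact pvDeg rows cols (Or.inl (by omega)) L
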